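-- pv_equiv track=rewrite | github.com/posgnu/ctfs | defcon2017_LV/clemency/tool/ROPcle/binary.py | binary2code
-- ===== SOURCE A (Python) =====
-- def binary2code(binary):
--   binstr = ""
--   for c in binary:
--     binstr += bin(c)[2:].rjust(8, '0')
--
--   length = len(binstr)
--   arr_length = int(length / 9)
--   byte_arr = [0 for i in range(arr_length)]
--
--   for i in range(arr_length):
--     bytestr = binstr[9 * i: 9 * (i+1)]
--     byte_arr[i] = int(bytestr, 2)
--
--   return byte_arr
-- ===== SOURCE B (Python) =====
-- def binary2code(binary):
--   # One pass with an integer bit accumulator instead of building a bit string.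
--   acc = 0
--   nbits = 0
--   out = []
--   for c in binary:
--     acc = acc * 256 + c
--     nbits += 8
--     while nbits >= 9:
--       nbits -= 9
--       out.append(acc // (1 << nbits) % 512)
--   return out
-- ===== Notes on version B (the rewrite author's own statement) =====
-- stated objective: alternative
-- what changed: Replaces the two-pass bit-string construction (concatenate bin().rjust(8) per byte, then slice and re-parse 9-char substrings) with a single pass keeping an integer bit accumulator and a bit counter, emitting each 9-bit value arithmetically.
-- outside the precondition, e.g. on binary2code([256]): A returns [256], B returns []; on binary2code([1, -1]): A returns [2], B returns [1]; on binary2code([-1, 0]): A raises ValueError, B returns [510]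
import Mathlib
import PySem

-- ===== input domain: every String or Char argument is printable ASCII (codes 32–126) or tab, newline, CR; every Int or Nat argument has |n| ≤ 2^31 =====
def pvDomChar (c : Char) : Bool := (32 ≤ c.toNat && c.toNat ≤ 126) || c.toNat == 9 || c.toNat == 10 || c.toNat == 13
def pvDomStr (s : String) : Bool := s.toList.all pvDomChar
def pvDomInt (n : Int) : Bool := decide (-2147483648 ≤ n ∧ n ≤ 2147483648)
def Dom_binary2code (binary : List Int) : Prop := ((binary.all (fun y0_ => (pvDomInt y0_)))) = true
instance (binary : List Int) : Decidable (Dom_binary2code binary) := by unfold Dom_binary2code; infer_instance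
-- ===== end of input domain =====

-- B replaces A's two-pass bit-string build/slice/re-parse with a one-pass integer bit
-- accumulator (alternative decomposition, same O(n) cost).

-- ===== PORT A =====
-- bin(n)[2:] for n ≥ 0 (Pre_ admits only byte values, so c.toNat below is exact)
def binChars (n : Nat) : List Char :=
  if n < 2 then [if n = 1 then '1' else '0']
  else binChars (n / 2) ++ [if n % 2 = 1 then '1' else '0']
termination_by n
decreasing_by exact Nat.div_lt_self (by omega) (by omega)

-- s.rjust(8, '0') (exact: pads on the left, never truncates)
def rjust8 (s : List Char) : List Char := List.replicate (8 - s.length) '0' ++ s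

-- int(s, 2): exact for the nonempty '0'/'1' strings produced here
def parseBin (s : List Char) : Int :=
  s.foldl (fun a ch => a * 2 + (if ch = '1' then 1 else 0)) 0

def binary2code (binary : List Int) : List Int :=
  let binstr := binary.foldl (fun s c => s ++ rjust8 (binChars c.toNat)) ([] : List Char)
  let arrLength := binstr.length / 9   -- int(length / 9), length ≥ 0
  (List.range arrLength).map (fun i =>
    parseBin (PySem.List.slice binstr (some ((9 * i : Nat) : Int)) (some ((9 * (i + 1) : Nat) : Int))))

-- ===== PORT B =====
-- the inner 'while nbits >= 9' loop of Source B (nbits is a count, always ≥ 0 in Python)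
def drainB (acc : Int) (nbits : Nat) (out : List Int) : Int × Nat × List Int :=
  if 9 ≤ nbits then
    drainB acc (nbits - 9)
      (out ++ [PySem.Int.mod (PySem.Int.floordiv acc ((1 : Int) <<< (nbits - 9))) 512])
  else (acc, nbits, out)
termination_by nbits

def binary2code_alt (binary : List Int) : List Int :=
  (binary.foldl (fun st c => drainB (st.1 * 256 + c) (st.2.1 + 8) st.2.2)
    ((0 : Int), (0 : Nat), ([] : List Int))).2.2

-- ===== PRECONDITION & SPEC =====
-- Pre_ restricts to the natural byte domain 0..255 of this bit-regrouping routine: on negative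
-- elements bin() yields a '-'/'b'-containing string so A raises ValueError or returns a value
-- produced from malformed text by accident, and on elements ≥ 256 A's rjust does not truncate,
-- so the blocks are no longer 8 bits wide.
def Pre_binary2code (binary : List Int) : Prop := ∀ c ∈ binary, 0 ≤ c ∧ c < 256
instance (binary : List Int) : Decidable (Pre_binary2code binary) := by
  unfold Pre_binary2code; infer_instance

def pvWitness_binary2code : List Int := [7, 200, 0]

def Spec_binary2code (binary : List Int) (out : List Int) : Prop := out = binary2code_alt binary
instance (binary : List Int) (out : List Int) : Decidable (Spec_binary2code binary out) := by
  unfold Spec_binary2code; infer_instance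

-- ===== CLAIM (what is proved, stated in full; the proofs are below) =====
def Claim_equal_binary2code : Prop := ∀ (binary : List Int), Dom_binary2code binary → Pre_binary2code binary → Spec_binary2code binary (binary2code binary)

-- ===== LEMMAS AND PROOFS =====

-- w-bit MSB-first binary rendering of N
def bitstring (N w : Nat) : List Char :=
  (List.range w).map (fun j => if N / 2 ^ (w - 1 - j) % 2 = 1 then '1' else '0')

-- value of an Int list of bytes over accumulator a (Nat level)
def ival (l : List Int) (a : Nat) : Nat := l.foldl (fun x c => x * 256 + c.toNat) a

theorem length_bitstring (N w : Nat) : (bitstring N w).length = w := by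
  simp [bitstring]

theorem bitstring_snoc (N w : Nat) :
    bitstring N (w + 1) = bitstring (N / 2) w ++ [if N % 2 = 1 then '1' else '0'] := by
  apply List.ext_getElem
  · simp [bitstring]
  intro i h1 h2
  simp only [bitstring, List.getElem_map, List.getElem_range]
  rcases Nat.lt_or_ge i w with hi | hi
  · rw [List.getElem_append_left (by simp [bitstring]; omega)]
    simp only [List.getElem_map, List.getElem_range]
    have h2 : N / 2 / 2 ^ (w - 1 - i) = N / 2 ^ (w + 1 - 1 - i) := by
      rw [Nat.div_div_eq_div_mul]
      have h3 : (2:Nat) * 2 ^ (w - 1 - i) = 2 ^ (w + 1 - 1 - i) := by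
        rw [← pow_succ']; congr 1; omega
      rw [h3]
    rw [h2]
  · have hiw : i = w := by simp [bitstring] at h1; omega
    subst hiw
    rw [List.getElem_append_right (by simp [bitstring])]
    simp [bitstring]


theorem bitstring_append (M c w k : Nat) (hc : c < 2 ^ k) :
    bitstring M w ++ bitstring c k = bitstring (M * 2 ^ k + c) (w + k) := by
  induction k generalizing c with
  | zero =>
    interval_cases c
    simp [bitstring]
  | succ k ih =>
    have hc2 : c / 2 < 2 ^ k := by
      have := Nat.pow_succ 2 k
      omega
    have hdiv : (M * 2 ^ (k + 1) + c) / 2 = M * 2 ^ k + c / 2 := by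
      rw [pow_succ]
      rw [show M * (2 ^ k * 2) + c = c + (M * 2 ^ k) * 2 by ring]
      rw [Nat.add_mul_div_right _ _ (by omega)]
      omega
    have hmod : (M * 2 ^ (k + 1) + c) % 2 = c % 2 := by
      have : M * 2 ^ (k + 1) + c = c + (M * 2 ^ k) * 2 := by rw [pow_succ]; ring
      rw [this, Nat.add_mul_mod_self_right]
    rw [bitstring_snoc c k, show w + (k + 1) = (w + k) + 1 from rfl,
        bitstring_snoc (M * 2 ^ (k + 1) + c) (w + k), hdiv, hmod,
        ← List.append_assoc, ih (c / 2) hc2]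


theorem bitstring_zero_eq (w : Nat) : bitstring 0 w = List.replicate w '0' := by
  apply List.ext_getElem
  · simp [bitstring]
  intro i h1 h2
  simp [bitstring]

theorem binChars_aux (n : Nat) : ∀ (w : Nat), 1 ≤ w → n < 2 ^ w →
    (binChars n).length ≤ w ∧
      bitstring n w = List.replicate (w - (binChars n).length) '0' ++ binChars n := by
  induction n using Nat.strong_induction_on with
  | _ n ih =>
    intro w hw hn
    by_cases h2 : n < 2
    · rw [binChars, if_pos h2]
      refine ⟨by simpa using hw, ?_⟩
      interval_cases n
      · simp only [show (0 = 1) = False by simp, if_false]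
        rw [bitstring_zero_eq, show w = (w - 1) + 1 by omega, List.replicate_succ']
        simp
      · simp only [if_true]
        rw [show w = (w - 1) + 1 by omega, bitstring_snoc]
        norm_num [bitstring_zero_eq]
    · have hw2 : 2 ≤ w := by
        rcases Nat.lt_or_ge w 2 with h | h
        · interval_cases w
          all_goals omega
        · exact h
      have hpow : 2 ^ w = 2 * 2 ^ (w - 1) := by
        rw [← pow_succ']
        congr 1
        omega
      have hdl : n / 2 < n := Nat.div_lt_self (by omega) (by omega)
      have hn2 : n < 2 * 2 ^ (w - 1) := by omega
      have hhalf : n / 2 < 2 ^ (w - 1) := Nat.div_lt_of_lt_mul (by omega)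
      have hrec := ih (n / 2) hdl (w - 1) (by omega) hhalf
      rw [binChars, if_neg h2]
      constructor
      · simp only [List.length_append, List.length_cons, List.length_nil]
        omega
      · rw [show w = (w - 1) + 1 by omega, bitstring_snoc, hrec.2,
            ← List.append_assoc]
        congr 2
        have := hrec.1
        congr 1
        simp only [List.length_append, List.length_cons, List.length_nil]
        omega

theorem rjust8_binChars (c : Nat) (hc : c < 256) :
    rjust8 (binChars c) = bitstring c 8 := by
  have h := (binChars_aux c 8 (by omega) (by norm_num; omega)).2
  rw [rjust8, h]


theorem parse_bitstring (w : Nat) (N : Nat) (a : Int) :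
    (bitstring N w).foldl (fun a ch => a * 2 + (if ch = '1' then 1 else 0)) a
      = a * 2 ^ w + ((N % 2 ^ w : Nat) : Int) := by
  induction w generalizing N a with
  | zero => simp [bitstring]
  | succ w ih =>
    rw [bitstring_snoc, List.foldl_append]
    rw [ih]
    simp only [List.foldl_cons, List.foldl_nil]
    have hm : N % 2 ^ (w + 1) = 2 * (N / 2 % 2 ^ w) + N % 2 := by
      have h1 : (2:Nat) ^ (w + 1) = 2 * 2 ^ w := by rw [pow_succ]; ring
      rw [h1, Nat.mod_mul]
      omega
    rcases Nat.mod_two_eq_zero_or_one N with hN | hN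
    all_goals simp [hN, hm]; ring


theorem drop_bitstring (N w a : Nat) (_h : a ≤ w) :
    (bitstring N w).drop a = bitstring N (w - a) := by
  apply List.ext_getElem
  · simp [bitstring]
  intro i h1 h2
  rw [List.getElem_drop]
  simp only [bitstring, List.getElem_map, List.getElem_range]
  simp only [bitstring, List.length_map, List.length_range] at h1 h2
  have h3 : w - a - 1 - i = w - 1 - (a + i) := by omega
  rw [h3]


theorem take_bitstring (N w b : Nat) (h : b ≤ w) :
    (bitstring N w).take b = bitstring (N / 2 ^ (w - b)) b := by
  apply List.ext_getElem
  · simp [bitstring]; omega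
  intro i h1 h2
  rw [List.getElem_take]
  simp only [bitstring, List.getElem_map, List.getElem_range]
  rw [Nat.div_div_eq_div_mul, ← pow_add]
  simp only [bitstring, List.length_map, List.length_range] at h1 h2
  have h3 : w - b + (b - 1 - i) = w - 1 - i := by omega
  rw [h3]


theorem binstr_eq (l : List Int) (h : ∀ c ∈ l, 0 ≤ c ∧ c < 256) (M w : Nat) :
    l.foldl (fun s c => s ++ rjust8 (binChars c.toNat)) (bitstring M w)
      = bitstring (ival l M) (w + 8 * l.length) := by
  induction l generalizing M w with
  | nil => simp [ival]
  | cons c l ih =>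
    have hc := h c (by simp)
    have hcn : c.toNat < 256 := by omega
    rw [List.foldl_cons, rjust8_binChars c.toNat hcn,
        bitstring_append M c.toNat w 8 (by norm_num; omega),
        ih (fun x hx => h x (by simp [hx])) (M * 2 ^ 8 + c.toNat) (w + 8)]
    have : (2:Nat) ^ 8 = 256 := by norm_num
    rw [this]
    congr 1
    simp only [List.length_cons]
    ring


theorem div_shift (A c k : Nat) (hc : c < 256) :
    (A * 256 + c) / 2 ^ (8 + k) = A / 2 ^ k := by
  rw [pow_add, ← Nat.div_div_eq_div_mul]
  congr 1
  have h8 : (2:Nat) ^ 8 = 256 := by norm_num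
  rw [h8, Nat.add_comm, Nat.add_mul_div_right _ _ (by omega : (0:Nat) < 256)]
  omega


theorem drainB_stop (acc : Int) (n : Nat) (out : List Int) (h : n < 9) :
    drainB acc n out = (acc, n, out) := by
  rw [drainB.eq_def, if_neg (by omega)]

theorem drainB_step (acc : Int) (n : Nat) (out : List Int) (h9 : 9 ≤ n) (h18 : n < 18) :
    drainB acc n out
      = (acc, n - 9,
         out ++ [PySem.Int.mod (PySem.Int.floordiv acc ((1 : Int) <<< (n - 9))) 512]) := by
  rw [drainB.eq_def, if_pos h9, drainB_stop _ _ _ (by omega)]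

theorem emit_cast (A n : Nat) :
    PySem.Int.mod (PySem.Int.floordiv (A : Int) ((1 : Int) <<< n)) 512
      = ((A / 2 ^ n % 512 : Nat) : Int) := by
  have h1 : ((1 : Int) <<< n) = ((2 ^ n : Nat) : Int) := by
    rw [Int.shiftLeft_eq]; push_cast; ring
  rw [h1, PySem.Int.floordiv_natCast]
  have h2 : (512 : Int) = ((512 : Nat) : Int) := by norm_num
  rw [h2, PySem.Int.mod_natCast]

theorem Bloop (l : List Int) (h : ∀ c ∈ l, 0 ≤ c ∧ c < 256) :
    ∀ (A r w : Nat) (out : List Int), 9 * r ≤ w → w - 9 * r ≤ 8 →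
    out = (List.range r).map (fun i => ((A / 2 ^ (w - 9 * (i + 1)) % 512 : Nat) : Int)) →
    (l.foldl (fun st c => drainB (st.1 * 256 + c) (st.2.1 + 8) st.2.2)
        ((A : Int), w - 9 * r, out)).2.2
      = (List.range ((w + 8 * l.length) / 9)).map
          (fun i => ((ival l A / 2 ^ (w + 8 * l.length - 9 * (i + 1)) % 512 : Nat) : Int)) := by
  induction l with
  | nil =>
    intro A r w out h1 h2 hout
    simp only [List.foldl_nil, List.length_nil, Nat.mul_zero, Nat.add_zero]
    have hr : w / 9 = r := by omega
    rw [hr, hout]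
    rfl
  | cons c l ih =>
    intro A r w out h1 h2 hout
    have hc := h c (by simp)
    have hcn : c.toNat < 256 := by omega
    have hcast : (A : Int) * 256 + c = ((A * 256 + c.toNat : Nat) : Int) := by
      have h0 := hc.1
      push_cast [Int.toNat_of_nonneg h0]
      ring
    have hmap : ∀ (w' : Nat), w ≤ w' →
        (List.range r).map (fun i => ((A / 2 ^ (w - 9 * (i + 1)) % 512 : Nat) : Int))
          = (List.range r).map
              (fun i => (((A * 256 + c.toNat) / 2 ^ (w + 8 - 9 * (i + 1)) % 512 : Nat) : Int)) := by
      intro w' _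
      apply List.map_congr_left
      intro i hi
      have hir : i < r := List.mem_range.mp hi
      have he : w + 8 - 9 * (i + 1) = 8 + (w - 9 * (i + 1)) := by omega
      rw [he, div_shift _ _ _ hcn]
    have h' : ∀ x ∈ l, 0 ≤ x ∧ x < 256 := fun x hx => h x (by simp [hx])
    simp only [List.foldl_cons]
    rw [hcast]
    by_cases hemit : 1 ≤ w - 9 * r
    · rw [drainB_step _ _ _ (by omega) (by omega), emit_cast]
      have hst : w - 9 * r + 8 - 9 = (w + 8) - 9 * (r + 1) := by omega
      rw [hst]
      have hout' : out ++ [(((A * 256 + c.toNat) / 2 ^ ((w + 8) - 9 * (r + 1)) % 512 : Nat) : Int)]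
          = (List.range (r + 1)).map
              (fun i => (((A * 256 + c.toNat) / 2 ^ (w + 8 - 9 * (i + 1)) % 512 : Nat) : Int)) := by
        rw [List.range_succ, List.map_append, hout, hmap w le_rfl]
        rfl
      rw [hout', ih h' (A * 256 + c.toNat) (r + 1) (w + 8) _ (by omega) (by omega) rfl]
      have hl : w + 8 + 8 * l.length = w + 8 * (c :: l).length := by
        simp [List.length_cons]; ring
      rw [hl]
      rfl
    · have hw9 : w = 9 * r := by omega
      rw [drainB_stop _ _ _ (by omega)]
      have hst : w - 9 * r + 8 = (w + 8) - 9 * r := by omega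
      rw [hst]
      have hout' : out = (List.range r).map
          (fun i => (((A * 256 + c.toNat) / 2 ^ (w + 8 - 9 * (i + 1)) % 512 : Nat) : Int)) := by
        rw [hout, hmap w le_rfl]
      rw [hout'] at *
      rw [ih h' (A * 256 + c.toNat) r (w + 8) _ (by omega) (by omega) rfl]
      have hl : w + 8 + 8 * l.length = w + 8 * (c :: l).length := by
        simp [List.length_cons]; ring
      rw [hl]
      rfl


-- ===== VERDICT (by name: the statement is the Claim_ definition above) =====
theorem binary2code_spec : Claim_equal_binary2code := by
  intro binary _hdom hpre
  unfold Spec_binary2code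
  simp only [binary2code, binary2code_alt]
  have hbin0 : ([] : List Char) = bitstring 0 0 := by simp [bitstring]
  rw [hbin0, binstr_eq binary hpre 0 0]
  have hB := Bloop binary hpre 0 0 0 [] (by omega) (by omega) (by simp)
  norm_num at hB
  rw [hB, length_bitstring]
  simp only [Nat.zero_add]
  apply List.map_congr_left
  intro i hi
  have hir : i < 8 * binary.length / 9 := List.mem_range.mp hi
  have h1 : 9 * i ≤ 8 * binary.length := by omega
  have h2 : 9 * (i + 1) ≤ 8 * binary.length := by omega
  rw [PySem.List.slice_natCast]
  have h9 : 9 * (i + 1) - 9 * i = 9 := by omega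
  rw [h9, drop_bitstring _ _ _ h1, take_bitstring _ _ _ (by omega)]
  unfold parseBin
  rw [parse_bitstring]
  have he : 8 * binary.length - 9 * i - 9 = 8 * binary.length - 9 * (i + 1) := by omega
  have h512 : (2 : Nat) ^ 9 = 512 := by norm_num
  rw [he, h512]
  push_cast
  ring
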